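-- pv_equiv track=rewrite | github.com/d-c-b/advent-of-code2022 | day20/solution.py | decrypt_input
-- ===== SOURCE A (Python) =====
-- def decrypt_input(input_array: list[int], n=1) -> list[int]:
--     indexed_input = list(enumerate(input_array))
--     for _ in range(n):
--         for i, val in enumerate(input_array):
--             index = indexed_input.index((i, val))
--             new_index = (index + val) % (len(input_array) - 1)
--             index_removed_array = [*indexed_input[:index], *indexed_input[index + 1 :]]
--             indexed_input = [
--                 *index_removed_array[:new_index],
--                 (i, val),
--                 *index_removed_array[new_index:],
--             ]
--     return [i[1] for i in indexed_input]
-- ===== SOURCE B (Python) =====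
-- def decrypt_input(input_array: list[int], n=1) -> list[int]:
--     N = len(input_array)
--     # pos[e] = current position of the element that started at index e (inverse permutation)
--     pos = list(range(N))
--     for _ in range(n):
--         for i in range(N):
--             p = pos[i]
--             q = (p + input_array[i]) % (N - 1)
--             new_pos = []
--             for e in range(N):
--                 if e == i:
--                     new_pos.append(q)
--                 else:
--                     r = pos[e]
--                     if r > p:
--                         r -= 1
--                     if r >= q:
--                         r += 1
--                     new_pos.append(r)
--             pos = new_pos
--     res = [0] * N
--     for e in range(N):
--         res[pos[e]] = input_array[e]
--     return res
-- ===== Notes on version B (the rewrite author's own statement) =====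
-- stated objective: alternative
-- what changed: A keeps the mixed sequence as a list of (index,value) pairs, locating each element with list.index and rebuilding the list by slice concatenation; B instead maintains the inverse permutation (a positions array updated arithmetically per move, no pair list, no searching) and scatters the values into the output array at the end.
import Mathlib
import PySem

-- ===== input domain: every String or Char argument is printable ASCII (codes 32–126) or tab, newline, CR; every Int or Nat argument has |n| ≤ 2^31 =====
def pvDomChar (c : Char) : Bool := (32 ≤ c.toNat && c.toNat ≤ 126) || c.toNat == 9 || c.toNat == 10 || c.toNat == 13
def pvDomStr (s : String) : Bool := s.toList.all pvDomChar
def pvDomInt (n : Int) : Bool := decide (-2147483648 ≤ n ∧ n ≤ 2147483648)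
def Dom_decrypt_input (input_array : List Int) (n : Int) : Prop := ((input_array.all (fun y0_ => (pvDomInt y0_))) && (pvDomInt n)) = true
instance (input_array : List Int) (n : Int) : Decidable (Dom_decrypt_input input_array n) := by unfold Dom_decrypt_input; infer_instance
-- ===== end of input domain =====

-- B replaces A's list-of-pairs state (locate by .index, rebuild by slicing) by the INVERSE
-- permutation: a positions array updated arithmetically each move, with the output scattered at
-- the end — an alternative algorithm of the same cost, not claimed faster.

-- ===== PORT A =====
-- one move of A's inner loop: locate the pair, remove it, re-insert at (index+val) % (len-1)
def pvAStep (vals : List Int) (L : List (Int × Int)) (iv : Int × Int) : List (Int × Int) :=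
  let index : Int := ((PySem.List.index? L iv).getD 0 : Nat)
  let newIndex : Int := PySem.Int.mod (index + iv.2) ((vals.length : Int) - 1)
  let removed := PySem.List.slice L none (some index) ++ PySem.List.slice L (some (index + 1)) none
  PySem.List.slice removed none (some newIndex) ++ [iv] ++ PySem.List.slice removed (some newIndex) none

-- one round: 'for i, val in enumerate(input_array)'
def pvARound (vals : List Int) (L : List (Int × Int)) : List (Int × Int) :=
  (PySem.List.enumerate vals).foldl (pvAStep vals) L

def decrypt_input (input_array : List Int) (n : Int) : List Int :=
  ((PySem.List.pyRange 0 n).foldl (fun L _ => pvARound input_array L)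
      (PySem.List.enumerate input_array)).map (fun p => p.2)

-- ===== PORT B =====
-- one move on the positions array: element i goes to q, every other position shifts
def pvBMove (vals : List Int) (pos : List Int) (i : Int) : List Int :=
  let p := PySem.List.pyGetD pos i 0
  let q := PySem.Int.mod (p + PySem.List.pyGetD vals i 0) ((vals.length : Int) - 1)
  (PySem.List.pyRange 0 (vals.length : Int)).foldl
    (fun new_pos e =>
      if e == i then new_pos ++ [q]
      else
        let r := PySem.List.pyGetD pos e 0
        let r := if p < r then r - 1 else r
        let r := if q ≤ r then r + 1 else r
        new_pos ++ [r])
    []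

def pvBRound (vals : List Int) (pos : List Int) : List Int :=
  (PySem.List.pyRange 0 (vals.length : Int)).foldl (pvBMove vals) pos

-- res = [0]*N; for e in range(N): res[pos[e]] = input_array[e]
def pvBScatter (vals : List Int) (pos : List Int) : List Int :=
  (PySem.List.pyRange 0 (vals.length : Int)).foldl
    (fun res e => PySem.List.pySetD res (PySem.List.pyGetD pos e 0) (PySem.List.pyGetD vals e 0))
    (List.replicate vals.length (0 : Int))

def decrypt_input_alt (input_array : List Int) (n : Int) : List Int :=
  pvBScatter input_array
    ((PySem.List.pyRange 0 n).foldl (fun pos _ => pvBRound input_array pos)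
      (PySem.List.pyRange 0 (input_array.length : Int)))

-- ===== PRECONDITION & SPEC =====
-- Pre_ excludes only the inputs where A raises: a one-element list with n ≥ 1 rounds hits '% 0'
-- (ZeroDivisionError).
def Pre_decrypt_input (input_array : List Int) (n : Int) : Prop :=
  input_array.length = 1 → n ≤ 0
instance (input_array : List Int) (n : Int) : Decidable (Pre_decrypt_input input_array n) := by
  unfold Pre_decrypt_input; infer_instance

def pvWitness_decrypt_input : List Int × Int := ([1, 2, -3, 3, -2, 0, 4], 2)

def Spec_decrypt_input (input_array : List Int) (n : Int) (out : List Int) : Prop :=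
  out = decrypt_input_alt input_array n
instance (input_array : List Int) (n : Int) (out : List Int) : Decidable (Spec_decrypt_input input_array n out) := by
  unfold Spec_decrypt_input; infer_instance

-- ===== CLAIM (what is proved, stated in full; the proofs are below) =====
def Claim_equal_decrypt_input : Prop := ∀ (input_array : List Int) (n : Int), Dom_decrypt_input input_array n → Pre_decrypt_input input_array n → Spec_decrypt_input input_array n (decrypt_input input_array n)

-- ===== LEMMAS AND PROOFS =====

-- the pair A keeps for the element that started at index e
def pvF (vals : List Int) (e : Nat) : Int × Int := ((e : Int), vals.getD e 0)

-- the simulation invariant: order is the current left-to-right list of original indices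
-- (a permutation of range N) and pos is its inverse, as B maintains it
def pvInv (vals : List Int) (order : List Nat) (pos : List Int) : Prop :=
  order.Perm (List.range vals.length) ∧ pos.length = vals.length ∧
    ∀ e, e < vals.length → pos.getD e 0 = (List.idxOf e order : Int)

theorem pvF_inj (vals : List Int) {a b : Nat} (h : pvF vals a = pvF vals b) : a = b := by
  simpa [pvF] using congrArg (fun p => p.1) h

theorem pvInsertIdx_eq {α : Type} (l : List α) (q : Nat) (a : α) (h : q ≤ l.length) :
    l.insertIdx q a = l.take q ++ a :: l.drop q := by
  induction l generalizing q with
  | nil => simp at h; subst h; simp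
  | cons x xs ih =>
    cases q with
    | zero => simp
    | succ q =>
      simp only [List.insertIdx_succ_cons, List.take_succ_cons, List.drop_succ_cons,
        List.cons_append]
      exact congrArg (x :: ·) (ih q (by simpa using h))

theorem pvIndex?_map (vals : List Int) (l : List Nat) (a : Nat) :
    PySem.List.index? (l.map (pvF vals)) (pvF vals a) = PySem.List.index? l a := by
  induction l with
  | nil => simp [PySem.List.index?_eq_idxOf?]
  | cons x xs ih =>
    by_cases hxa : x = a
    · subst hxa; rw [List.map_cons, PySem.List.index?_cons_self, PySem.List.index?_cons_self]
    · rw [List.map_cons, PySem.List.index?_cons_of_ne _ (fun h => hxa (pvF_inj vals h)),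
        PySem.List.index?_cons_of_ne _ hxa, ih]

-- the pair-list after one A-move of element i is the image under pvF of
-- (order.eraseIdx p).insertIdx q i, and B's position update is its inverse
theorem pvStep_sim (vals : List Int) (order : List Nat) (pos : List Int) (i : Nat)
    (hN : 2 ≤ vals.length) (hinv : pvInv vals order pos) (hi : i < vals.length) :
    ∃ order', pvInv vals order' (pvBMove vals pos (i : Int)) ∧
      pvAStep vals (order.map (pvF vals)) (pvF vals i) = order'.map (pvF vals) := by
  obtain ⟨hperm, hlen, hpos⟩ := hinv
  have horderlen : order.length = vals.length := by
    simpa using hperm.length_eq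
  have hnodup : order.Nodup := hperm.nodup_iff.mpr (List.nodup_range)
  have hmem : ∀ e, e < vals.length → e ∈ order := fun e he =>
    hperm.mem_iff.mpr (List.mem_range.mpr he)
  have hmem' : ∀ e ∈ order, e < vals.length := fun e he =>
    List.mem_range.mp (hperm.mem_iff.mp he)
  have hpN : List.idxOf i order < vals.length := by
    rw [← horderlen]; exact List.idxOf_lt_length_iff.mpr (hmem i hi)
  set p := List.idxOf i order with hp_def
  have hpo : p < order.length := by omega
  have hop : order[p] = i := List.getElem_idxOf hpo
  have hNpos : (0 : Int) < (vals.length : Int) - 1 := by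
    have : (2 : Int) ≤ (vals.length : Int) := by exact_mod_cast hN
    omega
  set qI := PySem.Int.mod ((p : Int) + vals.getD i 0) ((vals.length : Int) - 1) with hqI_def
  have hq0 : 0 ≤ qI := PySem.Int.mod_nonneg _ hNpos
  have hqlt : qI < (vals.length : Int) - 1 := PySem.Int.mod_lt _ hNpos
  set q := qI.toNat with hq_def
  have hqI : qI = (q : Int) := (Int.toNat_of_nonneg hq0).symm
  have hqN : q < vals.length - 1 := by omega
  set order1 := order.eraseIdx p with horder1_def
  have h1len : order1.length = vals.length - 1 := by
    rw [horder1_def, List.length_eraseIdx, if_pos hpo, horderlen]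
  set order' := order1.insertIdx q i with horder'_def
  have hq1 : q ≤ order1.length := by omega
  have h'len : order'.length = vals.length := by
    rw [horder'_def, List.length_insertIdx, if_pos hq1]; omega
  -- order' is again a permutation of range N
  have hdecomp : order = order.take p ++ i :: order.drop (p + 1) := by
    conv_lhs => rw [← List.take_append_drop p order]
    rw [← List.getElem_cons_drop hpo, hop]
  have hperm' : order'.Perm (List.range vals.length) := by
    refine ((List.perm_insertIdx i order1 hq1).trans ?_).trans hperm
    rw [horder1_def, List.eraseIdx_eq_take_drop_succ]
    exact (List.perm_middle.symm).trans (by rw [← hdecomp])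
  have hnodup' : order'.Nodup := hperm'.nodup_iff.mpr (List.nodup_range)
  have horq' : order'[q]? = some i := by
    rw [horder'_def, List.getElem?_insertIdx, if_neg (by omega), if_pos rfl, if_pos hq1]
  obtain ⟨hqlt', horq⟩ := List.getElem?_eq_some_iff.mp horq' 
  -- B's move is the comprehension over range N
  have hmove : pvBMove vals pos (i : Int) =
      (PySem.List.pyRange 0 (vals.length : Int)).map
        (fun e =>
          if e == (i : Int) then qI
          else
            let r := PySem.List.pyGetD pos e 0
            let r := if PySem.List.pyGetD pos (i : Int) 0 < r then r - 1 else r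
            let r := if qI ≤ r then r + 1 else r
            r) := by
    rw [pvBMove]
    have hpi : PySem.List.pyGetD pos (i : Int) 0 = ((p : Nat) : Int) := by
      rw [PySem.List.pyGetD_natCast, hpos i hi]
    rw [hpi]
    rw [show PySem.Int.mod (((p : Nat) : Int) + PySem.List.pyGetD vals (i : Int) 0)
          ((vals.length : Int) - 1) = qI from by
      rw [PySem.List.pyGetD_natCast, ← hqI_def]]
    rw [← hpi]
    refine Eq.trans (PySem.List.foldl_congr_mem (PySem.List.pyRange 0 (vals.length : Int)) _
        (fun new_pos e => new_pos ++ [(fun e : Int =>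
          if e == (i : Int) then qI
          else
            let r := PySem.List.pyGetD pos e 0
            let r := if PySem.List.pyGetD pos (i : Int) 0 < r then r - 1 else r
            let r := if qI ≤ r then r + 1 else r
            r) e]) [] ?_) ?_
    · intro acc x _
      by_cases h : x == (i : Int) <;> simp [h]
    · rw [PySem.List.foldl_append_singleton_eq_map, List.nil_append]
  have hpos'len : (pvBMove vals pos (i : Int)).length = vals.length := by
    rw [hmove, List.length_map, PySem.List.length_pyRange_one]; omega
  -- value of B's new positions array at each original index e
  have hval : ∀ e, e < vals.length →
      (pvBMove vals pos (i : Int)).getD e 0 = (List.idxOf e order' : Int) := by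
    intro e he
    have hgd : (pvBMove vals pos (i : Int)).getD e 0 =
        (fun (x : Int) =>
          if x == (i : Int) then qI
          else
            let r := PySem.List.pyGetD pos x 0
            let r := if PySem.List.pyGetD pos (i : Int) 0 < r then r - 1 else r
            let r := if qI ≤ r then r + 1 else r
            r) ((e : Nat) : Int) := by
      rw [hmove, PySem.List.pyRange_zero_natCast, List.map_map,
        List.getD_eq_getElem _ _ (by simpa using he), List.getElem_map, List.getElem_range]
      rfl
    by_cases hei : e = i
    · subst hei
      rw [hgd]; simp only [beq_self_eq_true, if_true]
      have : List.idxOf e order' = q := by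
        have := hnodup'.idxOf_getElem q hqlt'
        rwa [horq] at this
      rw [this, hqI]
    · -- e keeps (shifted) position
      have hrNlt : List.idxOf e order < vals.length := by
        rw [← horderlen]; exact List.idxOf_lt_length_iff.mpr (hmem e he)
      set rN := List.idxOf e order with hrN_def
      have hro : rN < order.length := by omega
      have hore : order[rN] = e := List.getElem_idxOf hro
      have hrp : rN ≠ p := by
        intro h
        have h1 : order[rN]? = some e := List.getElem?_eq_some_iff.mpr ⟨hro, hore⟩
        have h2 : order[p]? = some i := List.getElem?_eq_some_iff.mpr ⟨hpo, hop⟩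
        rw [h, h2] at h1
        exact hei (Option.some.inj h1).symm
      set r1 := if p < rN then rN - 1 else rN with hr1_def
      set r2 := if q ≤ r1 then r1 + 1 else r1 with hr2_def
      have hr1lt : r1 < vals.length - 1 := by
        rw [hr1_def]; split <;> omega
      have hor1 : order1[r1]? = some e := by
        rw [horder1_def, List.getElem?_eraseIdx]
        by_cases h : p < rN
        · rw [if_neg (by rw [hr1_def, if_pos h]; omega),
            show r1 + 1 = rN from by rw [hr1_def, if_pos h]; omega]
          exact List.getElem?_eq_some_iff.mpr ⟨hro, hore⟩
        · rw [if_pos (by rw [hr1_def, if_neg h]; omega),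
            show r1 = rN from by rw [hr1_def, if_neg h]]
          exact List.getElem?_eq_some_iff.mpr ⟨hro, hore⟩
      have hor2' : order'[r2]? = some e := by
        rw [horder'_def, List.getElem?_insertIdx]
        by_cases h : q ≤ r1
        · rw [if_neg (by rw [hr2_def, if_pos h]; omega),
            if_neg (by rw [hr2_def, if_pos h]; omega),
            show r2 - 1 = r1 from by rw [hr2_def, if_pos h]; omega]
          exact hor1
        · rw [if_pos (by rw [hr2_def, if_neg h]; omega),
            show r2 = r1 from by rw [hr2_def, if_neg h]]
          exact hor1
      obtain ⟨hr2lt, hor2⟩ := List.getElem?_eq_some_iff.mp hor2'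
      have hidx' : List.idxOf e order' = r2 := by
        have := hnodup'.idxOf_getElem r2 hr2lt
        rwa [hor2] at this
      have hbeq : (((e : Nat) : Int) == ((i : Nat) : Int)) = false := by
        simp [hei]
      rw [hgd]
      simp only [hbeq, Bool.false_eq_true, if_false, PySem.List.pyGetD_natCast,
        hpos e he, hpos i hi]
      rw [hidx', hqI, hr2_def, hr1_def]
      split_ifs <;> omega
  -- A's step produces the image of order'
  have hidxA : PySem.List.index? (order.map (pvF vals)) (pvF vals i) = some p := by
    rw [pvIndex?_map, PySem.List.index?_eq_idxOf?, List.idxOf?_eq_some_iff]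
    refine ⟨hpo, hop, fun j hj hje => ?_⟩
    have := hnodup.idxOf_getElem j (by omega)
    rw [hje] at this
    omega
  have hAstep : pvAStep vals (order.map (pvF vals)) (pvF vals i) = order'.map (pvF vals) := by
    rw [pvAStep, hidxA]
    simp only [Option.getD_some]
    have hsl1 : PySem.List.slice (order.map (pvF vals)) none (some ((p : Nat) : Int)) =
        (order.map (pvF vals)).take p := PySem.List.slice_to_natCast _ p
    have hsl2 : PySem.List.slice (order.map (pvF vals)) (some (((p : Nat) : Int) + 1)) none =
        (order.map (pvF vals)).drop (p + 1) := by
      rw [show ((p : Nat) : Int) + 1 = (((p + 1 : Nat)) : Int) from by push_cast; ring]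
      exact PySem.List.slice_from_natCast _ (p + 1)
    rw [hsl1, hsl2, ← List.map_take, ← List.map_drop, ← List.map_append,
      ← List.eraseIdx_eq_take_drop_succ, ← horder1_def]
    have hmod : PySem.Int.mod (((p : Nat) : Int) + (pvF vals i).2) ((vals.length : Int) - 1)
        = ((q : Nat) : Int) := by
      rw [pvF, ← hqI, hqI_def]
    rw [hmod, PySem.List.slice_to_natCast, PySem.List.slice_from_natCast,
      ← List.map_take, ← List.map_drop]
    rw [horder'_def, pvInsertIdx_eq order1 q i hq1]
    simp [pvF]
  exact ⟨order', ⟨hperm', hpos'len, hval⟩, hAstep⟩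

theorem pvFold_sim (vals : List Int) (hN : vals.length = 0 ∨ 2 ≤ vals.length) (is : List Int)
    (hb : ∀ x ∈ is, 0 ≤ x ∧ x < (vals.length : Int)) :
    ∀ order pos, pvInv vals order pos →
    ∃ order', pvInv vals order' (is.foldl (pvBMove vals) pos) ∧
      is.foldl (fun L j => pvAStep vals L (j, PySem.List.pyGetD vals j 0))
        (order.map (pvF vals)) = order'.map (pvF vals) := by
  induction is with
  | nil => intro order pos h; exact ⟨order, h, rfl⟩
  | cons x xs ih =>
    intro order pos h
    obtain ⟨hx0, hxN⟩ := hb x (by simp)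
    have hxi : x = ((x.toNat : Nat) : Int) := by omega
    have harg : ((x : Int), PySem.List.pyGetD vals x 0) = pvF vals x.toNat := by
      rw [PySem.List.pyGetD_of_nonneg vals 0 hx0]; simp [pvF]; omega
    have hN2 : 2 ≤ vals.length := by
      rcases hN with h' | h'
      · omega
      · exact h'
    obtain ⟨order1, h1, hA1⟩ := pvStep_sim vals order pos x.toNat hN2 h (by omega)
    rw [← hxi] at h1
    obtain ⟨order', h', hA'⟩ := ih (fun y hy => hb y (by simp [hy])) order1 (pvBMove vals pos x) h1
    refine ⟨order', h', ?_⟩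
    simp only [List.foldl_cons]
    rw [harg, hA1]
    exact hA'

theorem pvARound_eq (vals : List Int) (L : List (Int × Int)) :
    pvARound vals L = (PySem.List.pyRange 0 (vals.length : Int)).foldl
      (fun L j => pvAStep vals L (j, PySem.List.pyGetD vals j 0)) L := by
  rw [pvARound, PySem.List.enumerate_eq_map_pyRange vals 0, List.foldl_map]
  rfl

theorem pvRounds_sim (vals : List Int) (hN : vals.length = 0 ∨ 2 ≤ vals.length) (rs : List Int) :
    ∀ order pos, pvInv vals order pos →
    ∃ order', pvInv vals order' (rs.foldl (fun pos _ => pvBRound vals pos) pos) ∧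
      rs.foldl (fun L _ => pvARound vals L) (order.map (pvF vals)) = order'.map (pvF vals) := by
  induction rs with
  | nil => intro order pos h; exact ⟨order, h, rfl⟩
  | cons r rs ih =>
    intro order pos h
    obtain ⟨order1, h1, hA1⟩ := pvFold_sim vals hN (PySem.List.pyRange 0 (vals.length : Int))
      (fun x hx => by
        have := PySem.List.mem_pyRange_one.mp hx
        exact ⟨this.1, this.2⟩) order pos h
    obtain ⟨order', h', hA'⟩ := ih order1 _ h1
    refine ⟨order', ?_, ?_⟩
    · simpa [pvBRound] using h'
    · simp only [List.foldl_cons]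
      rw [pvARound_eq, hA1]
      simpa [pvBRound] using hA'

theorem pvInit_inv (vals : List Int) :
    pvInv vals (List.range vals.length) (PySem.List.pyRange 0 (vals.length : Int)) := by
  refine ⟨List.Perm.refl _, ?_, ?_⟩
  · rw [PySem.List.pyRange_zero_natCast, List.length_map, List.length_range]
  · intro e he
    rw [PySem.List.pyRange_zero_natCast,
      List.getD_eq_getElem _ _ (by simpa using he), List.getElem_map, List.getElem_range]
    have := (List.nodup_range (n := vals.length)).idxOf_getElem e (by simpa using he)
    rw [List.getElem_range] at this
    rw [this]

theorem pvEnumerate_eq (vals : List Int) :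
    PySem.List.enumerate vals = (List.range vals.length).map (pvF vals) := by
  apply List.ext_getElem?
  intro k
  rw [PySem.List.getElem?_enumerate]
  by_cases hk : k < vals.length
  · rw [List.getElem?_eq_getElem hk]
    rw [List.getElem?_eq_getElem (by simp [hk])]
    rw [List.getElem_map, List.getElem_range]
    simp [pvF, List.getElem?_eq_getElem hk]
  · have h1 : vals.length ≤ k := not_lt.mp hk
    rw [List.getElem?_eq_none h1, List.getElem?_eq_none (by simp [h1])]
    rfl

theorem pvScatter_foldl_length (vals : List Int) (order : List Nat) (es res : List Int) :
    (es.foldl (fun r e => r.set (List.idxOf e.toNat order) (vals.getD e.toNat 0)) res).length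
      = res.length := by
  induction es generalizing res with
  | nil => rfl
  | cons e es ih => rw [List.foldl_cons, ih, List.length_set]

theorem pvScatter_foldl_getD (vals : List Int) (order : List Nat)
    (hperm : order.Perm (List.range vals.length)) (es : List Int)
    (hb : ∀ e ∈ es, 0 ≤ e ∧ e < (vals.length : Int)) (res : List Int)
    (hres : res.length = vals.length) (k : Nat) (hk : k < vals.length) :
    (es.foldl (fun r e => r.set (List.idxOf e.toNat order) (vals.getD e.toNat 0)) res).getD k 0
      = if ((order.getD k 0 : Nat) : Int) ∈ es then vals.getD (order.getD k 0) 0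
        else res.getD k 0 := by
  have horderlen : order.length = vals.length := by simpa using hperm.length_eq
  have hnodup : order.Nodup := hperm.nodup_iff.mpr (List.nodup_range)
  have hko : k < order.length := by omega
  have hordk : order.getD k 0 = order[k]'hko := List.getD_eq_getElem _ _ hko
  induction es generalizing res with
  | nil => simp
  | cons e es ih =>
    obtain ⟨he0, heN⟩ := hb e (by simp)
    rw [List.foldl_cons]
    rw [ih (fun y hy => hb y (by simp [hy])) _ (by rw [List.length_set]; exact hres)]
    by_cases hm : ((order.getD k 0 : Nat) : Int) ∈ es
    · rw [if_pos hm, if_pos (List.mem_cons_of_mem e hm)]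
    · by_cases heq : e.toNat = order.getD k 0
      · have hmm : ((order.getD k 0 : Nat) : Int) ∈ e :: es := by
          rw [List.mem_cons]; left; omega
        rw [if_neg hm, if_pos hmm]
        have hidx : List.idxOf e.toNat order = k := by
          rw [heq, hordk]
          exact hnodup.idxOf_getElem k hko
        rw [hidx, heq, List.getD_eq_getElem _ _ (by rw [List.length_set]; omega),
          List.getElem_set_self]
      · have hmm : ¬ ((order.getD k 0 : Nat) : Int) ∈ e :: es := by
          intro h
          rcases List.mem_cons.mp h with h | h
          · omega
          · exact hm h
        rw [if_neg hm, if_neg hmm]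
        have hne : List.idxOf e.toNat order ≠ k := by
          intro h
          have hmemo : e.toNat ∈ order := hperm.mem_iff.mpr (List.mem_range.mpr (by omega))
          have hlt : List.idxOf e.toNat order < order.length :=
            List.idxOf_lt_length_iff.mpr hmemo
          have h1 : order[List.idxOf e.toNat order]? = some e.toNat :=
            List.getElem?_eq_some_iff.mpr ⟨hlt, List.getElem_idxOf hlt⟩
          have h2 : order[k]? = some (order[k]'hko) := List.getElem?_eq_getElem hko
          rw [h, h2] at h1
          exact heq (by rw [hordk]; exact (Option.some.inj h1).symm)
        rw [List.getD_eq_getElem _ _ (by rw [List.length_set]; omega),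
          List.getElem_set_ne hne]
        rw [List.getD_eq_getElem _ 0 (show k < res.length by omega)]

theorem pvScatter_eq (vals : List Int) (order : List Nat) (pos : List Int)
    (hinv : pvInv vals order pos) :
    pvBScatter vals pos = order.map (fun e => vals.getD e 0) := by
  obtain ⟨hperm, hlen, hpos⟩ := hinv
  have horderlen : order.length = vals.length := by simpa using hperm.length_eq
  rw [pvBScatter]
  rw [PySem.List.foldl_congr_mem _ _
    (fun r e => r.set (List.idxOf e.toNat order) (vals.getD e.toNat 0)) _ ?hcongr]
  case hcongr =>
    intro acc x hx
    obtain ⟨hx0, hxN⟩ := PySem.List.mem_pyRange_one.mp hx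
    have hxlt : x.toNat < vals.length := by omega
    rw [PySem.List.pyGetD_of_nonneg _ _ hx0, PySem.List.pyGetD_of_nonneg _ _ hx0,
      hpos x.toNat hxlt, PySem.List.pySetD_of_nonneg _ _ (by positivity), Int.toNat_natCast]
  apply List.ext_getElem
  · rw [pvScatter_foldl_length, List.length_replicate, List.length_map, horderlen]
  · intro k hk1 hk2
    have hkN : k < vals.length := by
      rw [pvScatter_foldl_length, List.length_replicate] at hk1; exact hk1
    have hko : k < order.length := by omega
    have hordmem : order[k]'hko < vals.length := by
      have : order[k]'hko ∈ order := List.getElem_mem hko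
      exact List.mem_range.mp (hperm.mem_iff.mp this)
    rw [← List.getD_eq_getElem _ 0 hk1,
      pvScatter_foldl_getD vals order hperm _
        (fun y hy => (PySem.List.mem_pyRange_one.mp hy).imp id id) _
        (by rw [List.length_replicate]) k hkN]
    have hordk : order.getD k 0 = order[k]'hko := List.getD_eq_getElem _ _ hko
    rw [if_pos (by rw [hordk]; exact PySem.List.mem_pyRange_one.mpr ⟨by positivity, by omega⟩)]
    rw [List.getElem_map, hordk]

theorem pvRangeMap (vals : List Int) :
    (List.range vals.length).map (fun e => vals.getD e 0) = vals := by
  apply List.ext_getElem (by simp)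
  intro k h1 h2
  rw [List.getElem_map, List.getElem_range, List.getD_eq_getElem _ _ h2]

-- ===== VERDICT (by name: the statement is the Claim_ definition above) =====
theorem decrypt_input_spec : Claim_equal_decrypt_input := by
  intro vals n _ hpre
  unfold Spec_decrypt_input
  by_cases h1 : vals.length = 1
  · -- a single round list is empty: n ≤ 0 by Pre_
    have hn : n ≤ 0 := hpre h1
    have hrs : PySem.List.pyRange 0 n = [] := PySem.List.pyRange_one_eq_nil (by omega)
    rw [decrypt_input, decrypt_input_alt, hrs, List.foldl_nil, List.foldl_nil,
      PySem.List.map_snd_enumerate, pvScatter_eq vals _ _ (pvInit_inv vals), pvRangeMap]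
  · have hN : vals.length = 0 ∨ 2 ≤ vals.length := by omega
    obtain ⟨order', hinv', hA⟩ := pvRounds_sim vals hN (PySem.List.pyRange 0 n)
      (List.range vals.length) (PySem.List.pyRange 0 (vals.length : Int)) (pvInit_inv vals)
    rw [decrypt_input, decrypt_input_alt, pvEnumerate_eq, hA,
      pvScatter_eq vals _ _ hinv', List.map_map]
    rfl
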